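-- pv_equiv track=rewrite | github.com/EndMove/Jeu-du-pendu | pendu-nihajer.py | afficher_pendu
-- ===== SOURCE A (Python) =====
-- pendu_num = """  +----------+
--   |          0
--   |          1
--   |         324
--   |        5 2 6
--   |         728
--   |       97   89
--  /|\\
-- / | \\
-- ~~~~~~~~~~~~~~~~~~~
-- ~~~~~~*******~~~~~~~~
-- ~x~x~x~x~x~x~x~x~x~x~~~"""
--
-- pendu = """  +----------+
--   |          |
--   |          0
--   |         /|\\
--   |        ° | °
--   |         /'\\
--   |       _/   \\_
--  /|\\
-- / | \\
-- ~~~~~~~~~~~~~~~~~~~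
-- ~~~~~~~~~~~~~~~~~~~~~
-- ~~~~~~~~~~~~~~~~~~~~~~~"""
--
-- def afficher_pendu(n: int, wrong: list, gagne: bool = False):
-- 	fin_success = "Gagné !"
-- 	fin_lose = "Perdu !"
-- 	dessin_pendu = ""
-- 	id_wrong = 1
-- 	tail_mot = 0
-- 	tail = len(pendu_num)
-- 	for i in range(0, len(pendu_num)):
-- 		if pendu_num[i].isdecimal():
-- 			if int(pendu_num[i]) <= n-1:
-- 				dessin_pendu += pendu[i]
-- 			elif int(pendu_num[i]) > n-1:
-- 				dessin_pendu += " "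
-- 		elif pendu_num[i] == "x":
-- 			if len(wrong) >= id_wrong:
-- 				dessin_pendu += wrong[id_wrong-1].upper()
-- 				id_wrong += 1
-- 			else:
-- 				dessin_pendu += pendu[i]
-- 		elif pendu_num[i] == "*":
-- 			if gagne == True:
-- 				if len(wrong) == 10:
-- 					dessin_pendu += fin_lose[tail_mot]
-- 					tail_mot += 1
-- 				else:
-- 					dessin_pendu += fin_success[tail_mot]
-- 					tail_mot += 1
-- 			else:
-- 				dessin_pendu += pendu[i]
-- 		else:
-- 			dessin_pendu += pendu[i]
-- 	return(dessin_pendu)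
-- ===== SOURCE B (Python) =====
-- pendu_num = """  +----------+
--   |          0
--   |          1
--   |         324
--   |        5 2 6
--   |         728
--   |       97   89
--  /|\\
-- / | \\
-- ~~~~~~~~~~~~~~~~~~~
-- ~~~~~~*******~~~~~~~~
-- ~x~x~x~x~x~x~x~x~x~x~~~"""
--
-- pendu = """  +----------+
--   |          |
--   |          0
--   |         /|\\
--   |        ° | °
--   |         /'\\
--   |       _/   \\_
--  /|\\
-- / | \\
-- ~~~~~~~~~~~~~~~~~~~
-- ~~~~~~~~~~~~~~~~~~~~~
-- ~~~~~~~~~~~~~~~~~~~~~~~"""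
--
--
-- def afficher_pendu(n: int, wrong: list, gagne: bool = False):
--     # pass 1: blank out the body parts that are not yet drawn
--     base = [' ' if c.isdecimal() and int(c) > n - 1 else p
--             for c, p in zip(pendu_num, pendu)]
--     # streams to splice into the drawing
--     subs = [w.upper() for w in wrong]
--     ending = ("Perdu !" if len(wrong) == 10 else "Gagné !") if gagne else ""
--     # pass 2: splice the streams into their slots
--     out = []
--     for c, b in zip(pendu_num, base):
--         if c == 'x' and subs:
--             out.append(subs.pop(0))
--         elif c == '*' and gagne:
--             out.append(ending[0])
--             ending = ending[1:]
--         else: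
--             out.append(b)
--     return ''.join(out)
-- ===== Notes on version B (the rewrite author's own statement) =====
-- stated objective: alternative
-- what changed: A builds the drawing in one pass with running id_wrong/tail_mot counters and per-character index lookups; B is a two-phase decomposition: first blank the not-yet-drawn body parts over the whole template, then splice precomputed streams (uppercased wrong letters, the ending word chosen once) into the 'x'/'*' slots.
import Mathlib
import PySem

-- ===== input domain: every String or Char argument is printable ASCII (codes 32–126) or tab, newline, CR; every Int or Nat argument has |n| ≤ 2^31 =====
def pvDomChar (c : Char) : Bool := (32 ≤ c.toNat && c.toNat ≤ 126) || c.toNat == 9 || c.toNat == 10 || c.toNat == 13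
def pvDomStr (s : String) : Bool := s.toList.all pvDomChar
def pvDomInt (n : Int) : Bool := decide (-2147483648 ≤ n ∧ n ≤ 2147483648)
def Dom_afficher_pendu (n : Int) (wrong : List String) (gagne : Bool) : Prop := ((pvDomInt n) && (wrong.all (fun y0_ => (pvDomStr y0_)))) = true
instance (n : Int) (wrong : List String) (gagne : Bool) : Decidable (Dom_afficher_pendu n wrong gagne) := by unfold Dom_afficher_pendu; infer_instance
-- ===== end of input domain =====

-- B replaces A's one-pass counter machine by a two-phase decomposition (blank the hidden
-- body parts first, then splice precomputed letter/ending streams); same return value, 'alternative'.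


-- module-level constants of Source A (identical in Source B)
def pvPenduNum : String := "  +----------+\n  |          0\n  |          1\n  |         324\n  |        5 2 6\n  |         728\n  |       97   89\n /|\\\n/ | \\\n~~~~~~~~~~~~~~~~~~~\n~~~~~~*******~~~~~~~~\n~x~x~x~x~x~x~x~x~x~x~~~"
def pvPendu : String := "  +----------+\n  |          |\n  |          0\n  |         /|\\\n  |        ° | °\n  |         /'\\\n  |       _/   \\_\n /|\\\n/ | \\\n~~~~~~~~~~~~~~~~~~~\n~~~~~~~~~~~~~~~~~~~~~\n~~~~~~~~~~~~~~~~~~~~~~~"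
def pvFinSuccess : List Char := "Gagné !".toList
def pvFinLose : List Char := "Perdu !".toList

-- ===== PORT A =====
-- A's loop body: for each i, pendu_num[i] / pendu[i] are read together, so the loop runs over
-- the zip of the two (equal-length) constants; the state is (dessin_pendu, id_wrong, tail_mot).
-- pendu_num[i].isdecimal() is PySem.Chars.isdigit (exact: the template is ASCII);
-- int(pendu_num[i]) on a digit char is toNat - 48 (exact);
-- fin_lose[tail_mot]/fin_success[tail_mot] are ported with getD (in range on every run:
-- the template has 7 '*' and both words have 7 characters); wrong[id_wrong-1] with getD
-- (guarded by len(wrong) >= id_wrong, so in range).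
def pvAStep (n : Int) (wrong : List String) (gagne : Bool)
    (st : List Char × Nat × Nat) (cp : Char × Char) : List Char × Nat × Nat :=
  match st, cp with
  | (acc, idw, tm), (c, p) =>
    if PySem.Chars.isdigit c then
      if (c.toNat : Int) - 48 ≤ n - 1 then (acc ++ [p], idw, tm)
      else if n - 1 < (c.toNat : Int) - 48 then (acc ++ [' '], idw, tm)
      else (acc, idw, tm)   -- unreachable third arm of the if/elif: Python appends nothing
    else if c = 'x' then
      if idw ≤ wrong.length then
        (acc ++ (PySem.Str.upper (wrong.getD (idw - 1) "")).toList, idw + 1, tm)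
      else (acc ++ [p], idw, tm)
    else if c = '*' then
      if gagne then
        if wrong.length = 10 then (acc ++ [pvFinLose.getD tm ' '], idw, tm + 1)
        else (acc ++ [pvFinSuccess.getD tm ' '], idw, tm + 1)
      else (acc ++ [p], idw, tm)
    else (acc ++ [p], idw, tm)

def afficher_pendu (n : Int) (wrong : List String) (gagne : Bool) : String :=
  String.ofList (((pvPenduNum.toList.zip pvPendu.toList).foldl (pvAStep n wrong gagne) ([], 1, 0)).1)

-- ===== PORT B =====
-- pass 1 of Source B: blank the body parts that are not yet drawn
def pvBlank (n : Int) (cp : Char × Char) : Char :=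
  if PySem.Chars.isdigit cp.1 ∧ n - 1 < (cp.1.toNat : Int) - 48 then ' ' else cp.2

-- pass 2 of Source B: splice the streams; state is (out, subs, ending); ending[0] is ported with
-- headD (in range on every run: 7 '*' and 7-character endings), ending[1:] is tail
def pvBStep (gagne : Bool) (st : List (List Char) × List (List Char) × List Char)
    (cb : Char × Char) : List (List Char) × List (List Char) × List Char :=
  match st, cb with
  | (out, subs, ending), (c, b) =>
    if c = 'x' ∧ subs ≠ [] then (out ++ [subs.headD []], subs.tail, ending)
    else if c = '*' ∧ gagne then (out ++ [[ending.headD ' ']], subs, ending.tail)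
    else (out ++ [[b]], subs, ending)

def afficher_pendu_alt (n : Int) (wrong : List String) (gagne : Bool) : String :=
  let base : List Char := (pvPenduNum.toList.zip pvPendu.toList).map (pvBlank n)
  let subs : List (List Char) := wrong.map (fun w => (PySem.Str.upper w).toList)
  let ending : List Char :=
    if gagne then (if wrong.length = 10 then pvFinLose else pvFinSuccess) else []
  let res := (pvPenduNum.toList.zip base).foldl (pvBStep gagne) ([], subs, ending)
  String.ofList (PySem.Chars.join [] res.1)   -- "".join(out)

-- ===== PRECONDITION & SPEC =====
def Spec_afficher_pendu (n : Int) (wrong : List String) (gagne : Bool) (out : String) : Prop := out = afficher_pendu_alt n wrong gagne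
instance (n : Int) (wrong : List String) (gagne : Bool) (out : String) : Decidable (Spec_afficher_pendu n wrong gagne out) := by unfold Spec_afficher_pendu; infer_instance

-- ===== CLAIM (what is proved, stated in full; the proofs are below) =====
def Claim_equal_afficher_pendu : Prop := ∀ (n : Int) (wrong : List String) (gagne : Bool), Dom_afficher_pendu n wrong gagne → Spec_afficher_pendu n wrong gagne (afficher_pendu n wrong gagne)

-- ===== LEMMAS AND PROOFS =====

-- ''.join is flatten
lemma pvJoin_eq_flatten (l : List (List Char)) : PySem.Chars.join [] l = l.flatten := by
  induction l with
  | nil => rfl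
  | cons x xs ih =>
    cases xs with
    | nil => simp [PySem.Chars.join, List.intercalate]
    | cons y ys =>
      simp only [PySem.Chars.join, List.intercalate] at *
      rw [List.intersperse_cons₂]
      simp at ih ⊢
      exact ih

-- the B-side streams
def pvSubs (wrong : List String) : List (List Char) :=
  wrong.map (fun w => (PySem.Str.upper w).toList)
def pvEnding (wrong : List String) (gagne : Bool) : List Char :=
  if gagne then (if wrong.length = 10 then pvFinLose else pvFinSuccess) else []

-- Main invariant: after A has consumed k letters of wrong and t of the ending word,
-- A's fold over any remaining template tail L equals B's fold over the corresponding
-- (template char, blanked char) tail with the streams dropped by k and t.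
lemma pvGo (n : Int) (wrong : List String) (gagne : Bool) (L : List (Char × Char)) :
    ∀ (k t : Nat) (accB : List (List Char)),
    (L.foldl (pvAStep n wrong gagne) (accB.flatten, k + 1, t)).1
      = ((L.map (fun cp => (cp.1, pvBlank n cp))).foldl (pvBStep gagne)
          (accB, (pvSubs wrong).drop k, (pvEnding wrong gagne).drop t)).1.flatten := by
  induction L with
  | nil => intro k t accB; simp
  | cons cp L ih =>
    intro k t accB
    obtain ⟨c, p⟩ := cp
    simp only [List.foldl_cons, List.map_cons]
    by_cases hx : c = 'x'
    · subst hx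
      have hd : PySem.Chars.isdigit 'x' = false := by decide
      by_cases hk : k + 1 ≤ wrong.length
      · have hsub : (pvSubs wrong).drop k ≠ [] := by
          simp [List.drop_eq_nil_iff, pvSubs]; omega
        have hstep : pvAStep n wrong gagne (accB.flatten, k + 1, t) ('x', p)
            = (accB.flatten ++ (PySem.Str.upper (wrong.getD k "")).toList, k + 2, t) := by
          simp [pvAStep, hd, hk]
        rw [hstep]
        have hbstep : pvBStep gagne (accB, (pvSubs wrong).drop k, (pvEnding wrong gagne).drop t)
            ('x', pvBlank n ('x', p))
            = (accB ++ [((pvSubs wrong).drop k).headD []], ((pvSubs wrong).drop k).tail,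
               (pvEnding wrong gagne).drop t) := by
          simp [pvBStep, hsub]
        rw [hbstep]
        have hhead : ((pvSubs wrong).drop k).headD [] = (PySem.Str.upper (wrong.getD k "")).toList := by
          have hklt : k < wrong.length := by omega
          simp [List.head?_drop, pvSubs, List.getElem?_map,
                List.getElem?_eq_getElem hklt]
        have htail : ((pvSubs wrong).drop k).tail = (pvSubs wrong).drop (k + 1) := List.tail_drop ..
        rw [hhead, htail]
        have := ih (k + 1) t (accB ++ [(PySem.Str.upper (wrong.getD k "")).toList])
        simpa using this
      · have hsub : (pvSubs wrong).drop k = [] := by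
          simp [List.drop_eq_nil_iff, pvSubs]; omega
        have hstep : pvAStep n wrong gagne (accB.flatten, k + 1, t) ('x', p)
            = (accB.flatten ++ [p], k + 1, t) := by
          simp [pvAStep, hd, hk]
        rw [hstep]
        have hbstep : pvBStep gagne (accB, (pvSubs wrong).drop k, (pvEnding wrong gagne).drop t)
            ('x', pvBlank n ('x', p))
            = (accB ++ [[pvBlank n ('x', p)]], (pvSubs wrong).drop k, (pvEnding wrong gagne).drop t) := by
          by_cases hg : gagne <;> simp [pvBStep, hsub, hg]
        rw [hbstep]
        have hb : pvBlank n ('x', p) = p := by simp [pvBlank, hd]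
        rw [hb, hsub]
        have := ih k t (accB ++ [[p]])
        simp [hsub] at this
        simpa using this
    · by_cases hs : c = '*'
      · subst hs
        have hd : PySem.Chars.isdigit '*' = false := by decide
        by_cases hg : gagne
        · subst hg
          have hstep : pvAStep n wrong true (accB.flatten, k + 1, t) ('*', p)
              = (accB.flatten ++ [(pvEnding wrong true).getD t ' '], k + 1, t + 1) := by
            by_cases h10 : wrong.length = 10 <;>
              simp [pvAStep, hd, h10, pvEnding]
          rw [hstep]
          have hbstep : pvBStep true (accB, (pvSubs wrong).drop k, (pvEnding wrong true).drop t)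
              ('*', pvBlank n ('*', p))
              = (accB ++ [[((pvEnding wrong true).drop t).headD ' ']], (pvSubs wrong).drop k,
                 ((pvEnding wrong true).drop t).tail) := by
            simp [pvBStep]
          rw [hbstep]
          have hhead : ((pvEnding wrong true).drop t).headD ' ' = (pvEnding wrong true).getD t ' ' := by
            simp [List.head?_drop, List.getD]
          have htail : ((pvEnding wrong true).drop t).tail = (pvEnding wrong true).drop (t + 1) :=
            List.tail_drop ..
          rw [hhead, htail]
          have := ih k (t + 1) (accB ++ [[(pvEnding wrong true).getD t ' ']])
          simpa using this
        · have hgf : gagne = false := by cases gagne <;> simp_all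
          subst hgf
          have hstep : pvAStep n wrong false (accB.flatten, k + 1, t) ('*', p)
              = (accB.flatten ++ [p], k + 1, t) := by
            simp [pvAStep, hd]
          rw [hstep]
          have hbstep : pvBStep false (accB, (pvSubs wrong).drop k, (pvEnding wrong false).drop t)
              ('*', pvBlank n ('*', p))
              = (accB ++ [[pvBlank n ('*', p)]], (pvSubs wrong).drop k, (pvEnding wrong false).drop t) := by
            simp [pvBStep]
          rw [hbstep]
          have hb : pvBlank n ('*', p) = p := by simp [pvBlank, hd]
          rw [hb]
          have := ih k t (accB ++ [[p]])
          simpa using this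
      · by_cases hd : PySem.Chars.isdigit c
        · -- digit position
          have hb : pvBlank n (c, p) = if n - 1 < (c.toNat : Int) - 48 then ' ' else p := by
            simp [pvBlank, hd]
          by_cases hn : (c.toNat : Int) - 48 ≤ n - 1
          · have hstep : pvAStep n wrong gagne (accB.flatten, k + 1, t) (c, p)
                = (accB.flatten ++ [p], k + 1, t) := by
              simp [pvAStep, hd, hn]
            have hb' : pvBlank n (c, p) = p := by rw [hb]; rw [if_neg (by omega)]
            have hbstep : pvBStep gagne (accB, (pvSubs wrong).drop k, (pvEnding wrong gagne).drop t)
                (c, pvBlank n (c, p))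
                = (accB ++ [[p]], (pvSubs wrong).drop k, (pvEnding wrong gagne).drop t) := by
              simp [pvBStep, hx, hs, hb']
            rw [hstep, hbstep]
            have := ih k t (accB ++ [[p]])
            simpa using this
          · have hstep : pvAStep n wrong gagne (accB.flatten, k + 1, t) (c, p)
                = (accB.flatten ++ [' '], k + 1, t) := by
              simp [pvAStep, hd, hn]; omega
            have hb' : pvBlank n (c, p) = ' ' := by rw [hb]; rw [if_pos (by omega)]
            have hbstep : pvBStep gagne (accB, (pvSubs wrong).drop k, (pvEnding wrong gagne).drop t)
                (c, pvBlank n (c, p))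
                = (accB ++ [[' ']], (pvSubs wrong).drop k, (pvEnding wrong gagne).drop t) := by
              simp [pvBStep, hx, hs, hb']
            rw [hstep, hbstep]
            have := ih k t (accB ++ [[' ']])
            simpa using this
        · -- plain position
          have hstep : pvAStep n wrong gagne (accB.flatten, k + 1, t) (c, p)
              = (accB.flatten ++ [p], k + 1, t) := by
            simp [pvAStep, hd, hx, hs]
          have hb' : pvBlank n (c, p) = p := by simp [pvBlank, hd]
          have hbstep : pvBStep gagne (accB, (pvSubs wrong).drop k, (pvEnding wrong gagne).drop t)
              (c, pvBlank n (c, p))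
              = (accB ++ [[p]], (pvSubs wrong).drop k, (pvEnding wrong gagne).drop t) := by
            simp [pvBStep, hx, hs, hb']
          rw [hstep, hbstep]
          have := ih k t (accB ++ [[p]])
          simpa using this

-- the first components of the zipped template are the template itself (concrete strings)
set_option maxRecDepth 40000 in
lemma pvFst_zip : pvPenduNum.toList = (pvPenduNum.toList.zip pvPendu.toList).map Prod.fst := by
  decide

-- ===== VERDICT (by name: the statement is the Claim_ definition above) =====
set_option maxRecDepth 40000 in
theorem afficher_pendu_spec : Claim_equal_afficher_pendu := by
  intro n wrong gagne _
  unfold Spec_afficher_pendu afficher_pendu afficher_pendu_alt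
  dsimp only
  have hzip : pvPenduNum.toList.zip ((pvPenduNum.toList.zip pvPendu.toList).map (pvBlank n))
      = (pvPenduNum.toList.zip pvPendu.toList).map (fun cp => (cp.1, pvBlank n cp)) := by
    conv_lhs => rw [pvFst_zip]
    exact List.zip_map'
  rw [hzip, pvJoin_eq_flatten]
  have hgo := pvGo n wrong gagne (pvPenduNum.toList.zip pvPendu.toList) 0 0 []
  simp only [List.flatten_nil, List.drop_zero, pvSubs, pvEnding] at hgo
  rw [hgo]
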